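-- pv_equiv track=rewrite | github.com/Vagacoder/Codesignal | python/Arcade/Core/C153TreeBottom.py | treeBottom
-- ===== SOURCE A (Python) =====
-- def treeBottom(tree: str) -> list:
--     result = []
--     maxLevel = 0
--     curLevel = 0
--     n = len(tree)
--     i = 0
--     while i < n:
--         c = tree[i]
--         if c == '(':
--             curLevel += 1
--             i += 1
--         elif c == ')':
--             curLevel -= 1
--             i += 1
--         elif c.isdigit():
--             number = c
--             i += 1
--             while i < n:
--                 if tree[i].isdigit():
--                     number += tree[i]
--                     i += 1
--                 else:
--                     break
--             if curLevel == maxLevel: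
--                 result.append(int(number))
--             elif curLevel > maxLevel:
--                 maxLevel = curLevel
--                 result = [int(number)]
--         else:
--             i += 1
--
--     return result
-- ===== SOURCE B (Python) =====
-- def treeBottom(tree: str) -> list:
--     # Phase 1: one scan collecting (depth, number) pairs for every maximal digit run.
--     pairs = []
--     depth = 0
--     i = 0
--     n = len(tree)
--     while i < n:
--         c = tree[i]
--         if c.isdigit():
--             j = i
--             while j < n and tree[j].isdigit():
--                 j += 1
--             pairs.append((depth, int(tree[i:j])))
--             i = j
--         else:
--             if c == '(':
--                 depth += 1
--             elif c == ')':
--                 depth -= 1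
--             i += 1
--     # Phase 2: the bottom level is the deepest level carrying a number (the root level 0 at least).
--     maxd = 0
--     for d, _ in pairs:
--         if d > maxd:
--             maxd = d
--     return [v for d, v in pairs if d == maxd]
-- ===== Notes on version B (the rewrite author's own statement) =====
-- stated objective: alternative
-- what changed: A fuses collection and selection in one pass with reset-on-deeper state (result/maxLevel); B decomposes into build-then-filter: one scan collects (depth, number) pairs, then the maximum depth is taken and the pairs at that depth are filtered out.
import Mathlib
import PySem

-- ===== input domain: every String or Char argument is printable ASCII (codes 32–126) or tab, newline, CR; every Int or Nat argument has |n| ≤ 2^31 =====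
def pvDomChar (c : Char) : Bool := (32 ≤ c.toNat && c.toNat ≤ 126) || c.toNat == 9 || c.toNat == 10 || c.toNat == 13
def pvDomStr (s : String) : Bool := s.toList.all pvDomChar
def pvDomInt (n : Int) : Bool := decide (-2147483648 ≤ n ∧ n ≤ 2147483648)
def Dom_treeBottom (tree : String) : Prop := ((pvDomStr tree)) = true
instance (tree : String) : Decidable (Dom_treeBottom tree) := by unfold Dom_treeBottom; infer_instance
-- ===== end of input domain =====

-- B replaces A's fused reset-on-deeper single pass by a build-then-filter decomposition
-- (collect (depth, number) pairs, then filter the pairs at the maximal depth); same cost.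

-- ===== PORT A =====
-- A's while-loop over indices, as structural recursion over the remaining characters;
-- the inner digit-collecting while is the maximal digit run takeWhile/dropWhile; int(number) is PySem.Int.ofChars?.
def treeBottomGoA (cs : List Char) (result : List Int) (maxLevel curLevel : Int) : List Int :=
  match cs with
  | [] => result
  | c :: rest =>
    if c = '(' then treeBottomGoA rest result maxLevel (curLevel + 1)
    else if c = ')' then treeBottomGoA rest result maxLevel (curLevel - 1)
    else if PySem.Chars.isdigit c then
      let number := c :: rest.takeWhile PySem.Chars.isdigit
      let rest' := rest.dropWhile PySem.Chars.isdigit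
      if curLevel = maxLevel then
        treeBottomGoA rest' (result ++ [(PySem.Int.ofChars? number).getD 0]) maxLevel curLevel
      else if curLevel > maxLevel then
        treeBottomGoA rest' [(PySem.Int.ofChars? number).getD 0] curLevel curLevel
      else
        treeBottomGoA rest' result maxLevel curLevel
    else treeBottomGoA rest result maxLevel curLevel
termination_by cs.length
decreasing_by
  · simp
  · simp
  · exact Nat.lt_succ_of_le (List.length_dropWhile_le _ _)
  · exact Nat.lt_succ_of_le (List.length_dropWhile_le _ _)
  · exact Nat.lt_succ_of_le (List.length_dropWhile_le _ _)
  · simp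

def treeBottom (tree : String) : List Int :=
  treeBottomGoA tree.toList [] 0 0

-- ===== PORT B =====
-- B's phase-1 scan: collect (depth, number) pairs (append-accumulator, like Source B's pairs list).
def treeBottomGoB (cs : List Char) (depth : Int) (pairs : List (Int × Int)) : List (Int × Int) :=
  match cs with
  | [] => pairs
  | c :: rest =>
    if PySem.Chars.isdigit c then
      let run := c :: rest.takeWhile PySem.Chars.isdigit
      treeBottomGoB (rest.dropWhile PySem.Chars.isdigit) depth
        (pairs ++ [(depth, (PySem.Int.ofChars? run).getD 0)])
    else if c = '(' then treeBottomGoB rest (depth + 1) pairs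
    else if c = ')' then treeBottomGoB rest (depth - 1) pairs
    else treeBottomGoB rest depth pairs
termination_by cs.length
decreasing_by
  · exact Nat.lt_succ_of_le (List.length_dropWhile_le _ _)
  · simp
  · simp
  · simp

def treeBottom_alt (tree : String) : List Int :=
  let pairs := treeBottomGoB tree.toList 0 []
  let maxd := pairs.foldl (fun m p => if p.1 > m then p.1 else m) 0
  (pairs.filter (fun p => p.1 = maxd)).map (·.2)

-- ===== PRECONDITION & SPEC =====
def Spec_treeBottom (tree : String) (out : List Int) : Prop := out = treeBottom_alt tree
instance (tree : String) (out : List Int) : Decidable (Spec_treeBottom tree out) := by unfold Spec_treeBottom; infer_instance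

-- ===== CLAIM (what is proved, stated in full; the proofs are below) =====
def Claim_equal_treeBottom : Prop := ∀ (tree : String), Dom_treeBottom tree → Spec_treeBottom tree (treeBottom tree)

-- ===== LEMMAS AND PROOFS =====

-- A's selection state machine, replayed over the pair list B collects.
def treeBottomSel (ps : List (Int × Int)) (result : List Int) (m : Int) : List Int :=
  match ps with
  | [] => result
  | (d, v) :: ps =>
    if d = m then treeBottomSel ps (result ++ [v]) m
    else if d > m then treeBottomSel ps [v] d
    else treeBottomSel ps result m

-- goB's accumulator is a pure prefix.
theorem treeBottomGoB_acc : ∀ (n : Nat) (cs : List Char), cs.length ≤ n →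
    ∀ (depth : Int) (pairs : List (Int × Int)),
    treeBottomGoB cs depth pairs = pairs ++ treeBottomGoB cs depth [] := by
  intro n
  induction n with
  | zero =>
      intro cs h depth pairs
      have : cs = [] := List.eq_nil_of_length_eq_zero (Nat.le_zero.mp h)
      subst this; simp [treeBottomGoB]
  | succ n ih =>
      intro cs h depth pairs
      match cs with
      | [] => simp [treeBottomGoB]
      | c :: rest =>
        have hr : rest.length ≤ n := Nat.succ_le_succ_iff.mp h
        have hr' : (rest.dropWhile PySem.Chars.isdigit).length ≤ n :=
          le_trans (List.length_dropWhile_le _ _) hr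
        conv_lhs => rw [treeBottomGoB]
        conv_rhs => rw [treeBottomGoB]
        by_cases hd : PySem.Chars.isdigit c
        · simp only [if_pos hd]
          rw [ih _ hr' depth (pairs ++ [_]), ih _ hr' depth ([] ++ [_])]
          simp
        · simp only [if_neg hd]
          by_cases hp : c = '('
          · simp only [if_pos hp]; exact ih _ hr _ _
          · simp only [if_neg hp]
            by_cases hq : c = ')'
            · simp only [if_pos hq]; exact ih _ hr _ _
            · simp only [if_neg hq]; exact ih _ hr _ _

-- goA is the selection machine run over goB's pairs.
theorem treeBottomGoA_eq_sel : ∀ (n : Nat) (cs : List Char), cs.length ≤ n →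
    ∀ (result : List Int) (maxLevel curLevel : Int),
    treeBottomGoA cs result maxLevel curLevel
      = treeBottomSel (treeBottomGoB cs curLevel []) result maxLevel := by
  intro n
  induction n with
  | zero =>
      intro cs h result maxLevel curLevel
      have : cs = [] := List.eq_nil_of_length_eq_zero (Nat.le_zero.mp h)
      subst this; simp [treeBottomGoA, treeBottomGoB, treeBottomSel]
  | succ n ih =>
      intro cs h result maxLevel curLevel
      match cs with
      | [] => simp [treeBottomGoA, treeBottomGoB, treeBottomSel]
      | c :: rest =>
        have hr : rest.length ≤ n := Nat.succ_le_succ_iff.mp h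
        have hr' : (rest.dropWhile PySem.Chars.isdigit).length ≤ n :=
          le_trans (List.length_dropWhile_le _ _) hr
        rw [treeBottomGoA, treeBottomGoB]
        by_cases hp : c = '('
        · have hd : PySem.Chars.isdigit c = false := by subst hp; decide
          rw [if_pos hp, hd]
          simp only [Bool.false_eq_true, if_false, if_pos hp]
          exact ih _ hr _ _ _
        · by_cases hq : c = ')'
          · have hd : PySem.Chars.isdigit c = false := by subst hq; decide
            rw [if_neg hp, if_pos hq, hd]
            simp only [Bool.false_eq_true, if_false, if_neg hp, if_pos hq]
            exact ih _ hr _ _ _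
          · by_cases hd : PySem.Chars.isdigit c
            · rw [if_neg hp, if_neg hq, if_pos hd, if_pos hd,
                treeBottomGoB_acc n _ hr']
              simp only [List.nil_append, List.singleton_append]
              rw [treeBottomSel]
              by_cases he : curLevel = maxLevel
              · rw [if_pos he, if_pos he, ih _ hr' _ _ _]
              · by_cases hg : curLevel > maxLevel
                · rw [if_neg he, if_pos hg, if_neg he, if_pos hg, ih _ hr' _ _ _]
                · rw [if_neg he, if_neg hg, if_neg he, if_neg hg, ih _ hr' _ _ _]
            · rw [if_neg hp, if_neg hq, if_neg hd]
              simp only [if_neg hd, if_neg hp, if_neg hq]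
              exact ih _ hr _ _ _

def treeBottomMaxd (ps : List (Int × Int)) (m : Int) : Int :=
  ps.foldl (fun m p => if p.1 > m then p.1 else m) m

theorem treeBottomMaxd_le (ps : List (Int × Int)) (m : Int) : m ≤ treeBottomMaxd ps m := by
  induction ps generalizing m with
  | nil => simp [treeBottomMaxd]
  | cons p ps ih =>
      simp only [treeBottomMaxd, List.foldl_cons]
      by_cases h : p.1 > m
      · simp only [if_pos h]
        exact le_trans (le_of_lt h) (ih p.1)
      · simp only [if_neg h]; exact ih m

-- The selection machine is a filter at the running maximum.
theorem treeBottomSel_eq_filter (ps : List (Int × Int)) (result : List Int) (m : Int) :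
    treeBottomSel ps result m
      = (if treeBottomMaxd ps m = m then result else [])
        ++ (ps.filter (fun p => p.1 = treeBottomMaxd ps m)).map (·.2) := by
  induction ps generalizing result m with
  | nil => simp [treeBottomSel, treeBottomMaxd]
  | cons p ps ih =>
      obtain ⟨d, v⟩ := p
      have hM : treeBottomMaxd ((d, v) :: ps) m
          = treeBottomMaxd ps (if d > m then d else m) := by
        simp [treeBottomMaxd]
      rw [treeBottomSel]
      by_cases he : d = m
      · have hdm : ¬ d > m := by omega
        rw [if_pos he, hM, if_neg hdm, ih]
        by_cases hMm : treeBottomMaxd ps m = m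
        · rw [if_pos hMm, if_pos hMm]
          have : d = treeBottomMaxd ps m := by omega
          simp [this]
        · rw [if_neg hMm, if_neg hMm]
          have : ¬ d = treeBottomMaxd ps m := by omega
          simp [this]
      · rw [if_neg he]
        by_cases hg : d > m
        · rw [if_pos hg, hM, if_pos hg, ih]
          have hle := treeBottomMaxd_le ps d
          have hMm : ¬ treeBottomMaxd ps d = m := by omega
          rw [if_neg hMm]
          by_cases hMd : treeBottomMaxd ps d = d
          · rw [if_pos hMd]
            simp [hMd]
          · rw [if_neg hMd]
            have : ¬ d = treeBottomMaxd ps d := fun h => hMd h.symm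
            simp [this]
        · rw [if_neg hg, hM, if_neg hg, ih]
          have hle := treeBottomMaxd_le ps m
          have : ¬ d = treeBottomMaxd ps m := by omega
          simp [this]

-- ===== VERDICT (by name: the statement is the Claim_ definition above) =====
theorem treeBottom_spec : Claim_equal_treeBottom := by
  intro tree _
  unfold Spec_treeBottom treeBottom treeBottom_alt
  rw [treeBottomGoA_eq_sel tree.toList.length tree.toList le_rfl, treeBottomSel_eq_filter]
  simp [treeBottomMaxd]
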